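-- pv_equiv track=rewrite | github.com/eric22gh/Python-course | 90Days-of-Python-Backend/Day-21_Iterators_and_Generators.py | movimientos_posibles
-- ===== SOURCE A (Python) =====
-- def movimientos_posibles(posicion):
--     x, y = posicion
--     movimientos = []
--     direcciones = [(-1, -1), (-1, 0), (-1, 1), (0, -1), (0, 1), (1, -1), (1, 0), (1, 1)]
--
--     for dx, dy in direcciones:
--         nx, ny = x + dx, y + dy
--         if 0 <= nx < 8 and 0 <= ny < 8:  # en el tablero
--             movimientos.append((nx, ny)) # append solo acepta un argumento
--     return movimientos
-- ===== SOURCE B (Python) =====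
-- def movimientos_posibles(posicion):
--     x, y = posicion
--     movimientos = []
--     for nx in range(max(0, x - 1), min(8, x + 2)):
--         for ny in range(max(0, y - 1), min(8, y + 2)):
--             if (nx, ny) != (x, y):
--                 movimientos.append((nx, ny))
--     return movimientos
-- ===== Notes on version B (the rewrite author's own statement) =====
-- stated objective: simpler
-- what changed: B iterates directly over the clamped coordinate ranges range(max(0,x-1),min(8,x+2)) x range(max(0,y-1),min(8,y+2)) skipping the centre, instead of testing 8 direction offsets against bounds.
import Mathlib
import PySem

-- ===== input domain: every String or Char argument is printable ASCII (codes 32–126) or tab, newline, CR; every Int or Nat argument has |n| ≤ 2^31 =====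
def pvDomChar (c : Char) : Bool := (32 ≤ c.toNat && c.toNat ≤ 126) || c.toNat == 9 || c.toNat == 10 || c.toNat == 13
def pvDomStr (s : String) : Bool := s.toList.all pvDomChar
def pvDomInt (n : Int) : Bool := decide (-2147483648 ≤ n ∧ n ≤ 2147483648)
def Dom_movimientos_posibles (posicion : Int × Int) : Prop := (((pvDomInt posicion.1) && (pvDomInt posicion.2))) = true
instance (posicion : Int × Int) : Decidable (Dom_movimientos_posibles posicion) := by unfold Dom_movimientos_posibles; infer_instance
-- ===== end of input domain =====

-- ===== PORT A =====
-- B iterates the clamped neighbour coordinate ranges directly (skipping the centre)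
-- instead of testing 8 direction offsets against bounds; objective: simpler.
def movimientos_posibles (posicion : Int × Int) : List (Int × Int) :=
  let x := posicion.1
  let y := posicion.2
  let direcciones : List (Int × Int) :=
    [(-1, -1), (-1, 0), (-1, 1), (0, -1), (0, 1), (1, -1), (1, 0), (1, 1)]
  direcciones.foldl (fun movimientos d =>
    let nx := x + d.1
    let ny := y + d.2
    if 0 ≤ nx ∧ nx < 8 ∧ 0 ≤ ny ∧ ny < 8 then movimientos ++ [(nx, ny)]
    else movimientos) []

-- ===== PORT B =====
def movimientos_posibles_alt (posicion : Int × Int) : List (Int × Int) :=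
  let x := posicion.1
  let y := posicion.2
  (PySem.List.pyRange (max 0 (x - 1)) (min 8 (x + 2)) 1).foldl (fun movimientos nx =>
    (PySem.List.pyRange (max 0 (y - 1)) (min 8 (y + 2)) 1).foldl (fun movimientos ny =>
      if (nx, ny) ≠ (x, y) then movimientos ++ [(nx, ny)]
      else movimientos) movimientos) []

-- ===== PRECONDITION & SPEC =====
def Spec_movimientos_posibles (posicion : Int × Int) (out : List (Int × Int)) : Prop := out = movimientos_posibles_alt posicion
instance (posicion : Int × Int) (out : List (Int × Int)) : Decidable (Spec_movimientos_posibles posicion out) := by unfold Spec_movimientos_posibles; infer_instance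

-- ===== CLAIM (what is proved, stated in full; the proofs are below) =====
def Claim_equal_movimientos_posibles : Prop := ∀ (posicion : Int × Int), Dom_movimientos_posibles posicion → Spec_movimientos_posibles posicion (movimientos_posibles posicion)

-- ===== LEMMAS AND PROOFS =====

theorem pv_foldl_id {α β : Type} (l : List α) (init : β) :
    l.foldl (fun b _ => b) init = init := by
  induction l generalizing init with
  | nil => rfl
  | cons a t ih => exact ih init

-- a filtering fold whose condition never holds leaves the accumulator unchanged
theorem pv_foldl_filter_false {α β : Type} (l : List α) (P : α → Prop) [DecidablePred P]
    (g : α → β) (acc : List β) (h : ∀ a ∈ l, ¬ P a) :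
    l.foldl (fun acc a => if P a then acc ++ [g a] else acc) acc = acc := by
  induction l generalizing acc with
  | nil => rfl
  | cons a t ih =>
    rw [List.foldl_cons, if_neg (h a (List.mem_cons_self))]
    exact ih acc (fun b hb => h b (List.mem_cons_of_mem a hb))

-- A returns [] when x is off the board by 2 or more (every nx fails the bounds test)
theorem pvA_nil_of_x {x y : Int} (hx : x ≤ -2 ∨ 9 ≤ x) :
    movimientos_posibles (x, y) = [] := by
  refine pv_foldl_filter_false _
    (fun d : Int × Int => 0 ≤ x + d.1 ∧ x + d.1 < 8 ∧ 0 ≤ y + d.2 ∧ y + d.2 < 8)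
    (fun d => (x + d.1, y + d.2)) [] ?_
  intro a ha
  fin_cases ha <;> simp <;> omega

-- A returns [] when y is off the board by 2 or more
theorem pvA_nil_of_y {x y : Int} (hy : y ≤ -2 ∨ 9 ≤ y) :
    movimientos_posibles (x, y) = [] := by
  refine pv_foldl_filter_false _
    (fun d : Int × Int => 0 ≤ x + d.1 ∧ x + d.1 < 8 ∧ 0 ≤ y + d.2 ∧ y + d.2 < 8)
    (fun d => (x + d.1, y + d.2)) [] ?_
  intro a ha
  fin_cases ha <;> simp <;> omega

theorem pvB_nil_of_x {x y : Int} (hx : x ≤ -2 ∨ 9 ≤ x) :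
    movimientos_posibles_alt (x, y) = [] := by
  simp only [movimientos_posibles_alt]
  rw [PySem.List.pyRange_one_eq_nil (a := max 0 (x - 1)) (by omega)]
  rfl

theorem pvB_nil_of_y {x y : Int} (hy : y ≤ -2 ∨ 9 ≤ y) :
    movimientos_posibles_alt (x, y) = [] := by
  simp only [movimientos_posibles_alt]
  rw [PySem.List.pyRange_one_eq_nil (a := max 0 (y - 1)) (by omega)]
  simp only [List.foldl_nil]
  exact pv_foldl_id _ _

-- ===== VERDICT (by name: the statement is the Claim_ definition above) =====
theorem movimientos_posibles_spec : Claim_equal_movimientos_posibles := by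
  rintro ⟨x, y⟩ _
  unfold Spec_movimientos_posibles
  by_cases hx : x ≤ -2
  · rw [pvA_nil_of_x (Or.inl hx), pvB_nil_of_x (Or.inl hx)]
  by_cases hx' : 9 ≤ x
  · rw [pvA_nil_of_x (Or.inr hx'), pvB_nil_of_x (Or.inr hx')]
  by_cases hy : y ≤ -2
  · rw [pvA_nil_of_y (Or.inl hy), pvB_nil_of_y (Or.inl hy)]
  by_cases hy' : 9 ≤ y
  · rw [pvA_nil_of_y (Or.inr hy'), pvB_nil_of_y (Or.inr hy')]
  have hx1 : -1 ≤ x := by omega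
  have hx2 : x ≤ 8 := by omega
  have hy1 : -1 ≤ y := by omega
  have hy2 : y ≤ 8 := by omega
  interval_cases x <;> interval_cases y <;> decide
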